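-- pv_equiv track=rewrite | github.com/thu-coai/CrossWOZ | convlab2/policy/rule/multiwoz/policy_agenda_multiwoz.py | simple_fuzzy_match
-- ===== SOURCE A (Python) =====
-- def simple_fuzzy_match(value_list, value):
--     # check contain relation
--     v0 = ' '.join(value.split())
--     v0N = ''.join(value.split())
--     for val in value_list:
--         v1 = ' '.join(val.split())
--         if v0 in v1 or v1 in v0 or v0N in v1 or v1 in v0N:
--             return v1
--     value = value.lower()
--     v0 = ' '.join(value.split())
--     v0N = ''.join(value.split())
--     for val in value_list:
--         v1 = ' '.join(val.split())
--         if v0 in v1 or v1 in v0 or v0N in v1 or v1 in v0N: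
--             return v1
--     return None
-- ===== SOURCE B (Python) =====
-- def simple_fuzzy_match(value_list, value):
--     # single pass: return first strict match immediately; remember the first
--     # lowercase-variant match as a fallback returned after the loop
--     a0, a0n = ' '.join(value.split()), ''.join(value.split())
--     low = value.lower()
--     b0, b0n = ' '.join(low.split()), ''.join(low.split())
--     fallback = None
--     for val in value_list:
--         v1 = ' '.join(val.split())
--         if a0 in v1 or v1 in a0 or a0n in v1 or v1 in a0n:
--             return v1
--         if fallback is None and (b0 in v1 or v1 in b0 or b0n in v1 or v1 in b0n):
--             fallback = v1
--     return fallback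
-- ===== Notes on version B (the rewrite author's own statement) =====
-- stated objective: alternative
-- what changed: B traverses value_list once with a fallback accumulator (first lowercase-variant match), returning strict matches immediately, instead of A's two separate staged passes over the list.
import Mathlib
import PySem

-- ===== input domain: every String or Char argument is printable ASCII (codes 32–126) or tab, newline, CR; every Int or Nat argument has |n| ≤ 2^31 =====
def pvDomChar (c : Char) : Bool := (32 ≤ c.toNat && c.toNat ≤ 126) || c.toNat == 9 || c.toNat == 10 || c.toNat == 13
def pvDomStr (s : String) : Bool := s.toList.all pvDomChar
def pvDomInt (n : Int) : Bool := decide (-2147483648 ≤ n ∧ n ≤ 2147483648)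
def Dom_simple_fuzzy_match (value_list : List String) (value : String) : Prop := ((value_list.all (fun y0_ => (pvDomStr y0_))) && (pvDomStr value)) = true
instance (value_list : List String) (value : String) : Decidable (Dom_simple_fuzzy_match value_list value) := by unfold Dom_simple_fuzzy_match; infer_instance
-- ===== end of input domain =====

-- B makes a single pass with a fallback accumulator (first lowercase-variant match) instead of A's two staged passes; same result, one traversal.

-- ===== PORT A =====
-- A's for-loop over value_list (normalizing each val inside the loop), early return on match
def sfm_loopA (v0 v0N : String) : List String → Option String
  | [] => none
  | val :: rest =>
    let v1 := PySem.Str.join " " (PySem.Str.split₀ val)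
    if PySem.Str.isIn v0 v1 || PySem.Str.isIn v1 v0 ||
       PySem.Str.isIn v0N v1 || PySem.Str.isIn v1 v0N then some v1
    else sfm_loopA v0 v0N rest

def simple_fuzzy_match (value_list : List String) (value : String) : Option String :=
  let v0 := PySem.Str.join " " (PySem.Str.split₀ value)
  let v0N := PySem.Str.join "" (PySem.Str.split₀ value)
  match sfm_loopA v0 v0N value_list with
  | some v1 => some v1
  | none =>
    let value' := PySem.Str.lower value
    let v0' := PySem.Str.join " " (PySem.Str.split₀ value')
    let v0N' := PySem.Str.join "" (PySem.Str.split₀ value')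
    sfm_loopA v0' v0N' value_list

-- ===== PORT B =====
-- B's single pass: early return on a strict match, accumulate the first lowercase-variant match
def sfm_loopB (a0 a0n b0 b0n : String) (fb : Option String) : List String → Option String
  | [] => fb
  | val :: rest =>
    let v1 := PySem.Str.join " " (PySem.Str.split₀ val)
    if PySem.Str.isIn a0 v1 || PySem.Str.isIn v1 a0 ||
       PySem.Str.isIn a0n v1 || PySem.Str.isIn v1 a0n then some v1
    else if fb = none && (PySem.Str.isIn b0 v1 || PySem.Str.isIn v1 b0 ||
         PySem.Str.isIn b0n v1 || PySem.Str.isIn v1 b0n) then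
      sfm_loopB a0 a0n b0 b0n (some v1) rest
    else sfm_loopB a0 a0n b0 b0n fb rest

def simple_fuzzy_match_alt (value_list : List String) (value : String) : Option String :=
  let a0 := PySem.Str.join " " (PySem.Str.split₀ value)
  let a0n := PySem.Str.join "" (PySem.Str.split₀ value)
  let low := PySem.Str.lower value
  let b0 := PySem.Str.join " " (PySem.Str.split₀ low)
  let b0n := PySem.Str.join "" (PySem.Str.split₀ low)
  sfm_loopB a0 a0n b0 b0n none value_list

-- ===== PRECONDITION & SPEC =====
def Spec_simple_fuzzy_match (value_list : List String) (value : String) (out : Option String) : Prop := out = simple_fuzzy_match_alt value_list value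
instance (value_list : List String) (value : String) (out : Option String) : Decidable (Spec_simple_fuzzy_match value_list value out) := by unfold Spec_simple_fuzzy_match; infer_instance

-- ===== CLAIM =====
def Claim_equal_simple_fuzzy_match : Prop := ∀ (value_list : List String) (value : String), Dom_simple_fuzzy_match value_list value → Spec_simple_fuzzy_match value_list value (simple_fuzzy_match value_list value)

-- ===== LEMMAS AND PROOFS =====
-- B's single pass with accumulator equals: A's strict pass, then the fallback, then A's lowercase pass
theorem sfm_loopB_eq (a0 a0n b0 b0n : String) (l : List String) : ∀ fb : Option String,
    sfm_loopB a0 a0n b0 b0n fb l =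
      match sfm_loopA a0 a0n l with
      | some v => some v
      | none =>
        match fb with
        | some f => some f
        | none => sfm_loopA b0 b0n l := by
  induction l with
  | nil => intro fb; cases fb <;> rfl
  | cons val rest ih =>
    intro fb
    simp only [sfm_loopB, sfm_loopA]
    split_ifs with h1 h2 h3 <;>
      first
        | rfl
        | (rw [ih]
           try rcases fb with _ | f
           all_goals cases h : sfm_loopA a0 a0n rest <;> simp_all)

-- ===== VERDICT =====
theorem simple_fuzzy_match_spec : Claim_equal_simple_fuzzy_match := by
  intro value_list value _
  unfold Spec_simple_fuzzy_match simple_fuzzy_match simple_fuzzy_match_alt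
  rw [sfm_loopB_eq]
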